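-- pv_equiv track=rewrite | github.com/LynnixZ/langslam-site | create_env/carved_path_room.py | _segments_from_path
-- ===== SOURCE A (Python) =====
-- def _segments_from_path(path_seq, dir_seq):
--     """
--     把 (path_seq, dir_seq) 切成若干段，每段朝向不变且相邻格子相差 1。
--     返回: [(cells, d), ...]，cells 是该段的坐标列表。
--     """
--     if not path_seq:
--         return []
--
--     segs = []
--     cur_cells = [path_seq[0]]
--     cur_dir = dir_seq[0]
--
--     for i in range(1, len(path_seq)):
--         p_prev, p = path_seq[i-1], path_seq[i]
--         d_prev, d = dir_seq[i-1], dir_seq[i]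
--
--         # 只把“真正前进”的格子算进段里（转向时位置不动，会被这里自动打断）
--         is_step = (abs(p[0]-p_prev[0]) + abs(p[1]-p_prev[1]) == 1)
--         if is_step and d == cur_dir:
--             cur_cells.append(p)
--         else:
--             if len(cur_cells) >= 1:
--                 segs.append((cur_cells, cur_dir))
--             cur_cells = [p]
--             cur_dir = d
--
--     if len(cur_cells) >= 1:
--         segs.append((cur_cells, cur_dir))
--     return segs
-- ===== SOURCE B (Python) =====
-- def _segments_from_path(path_seq, dir_seq):
--     if not path_seq:
--         return []
--     n = len(path_seq)
--     # segment starts: 0, plus every index where the move is not a unit step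
--     # or the direction changes (the break test is purely local).
--     starts = [0] + [i for i in range(1, n)
--                     if abs(path_seq[i][0] - path_seq[i-1][0])
--                        + abs(path_seq[i][1] - path_seq[i-1][1]) != 1
--                        or dir_seq[i] != dir_seq[i-1]]
--     bounds = starts + [n]
--     return [(path_seq[s:e], dir_seq[s]) for s, e in zip(bounds, bounds[1:])]
-- ===== Notes on version B (the rewrite author's own statement) =====
-- stated objective: alternative
-- what changed: Replaces A's single stateful fold (growing the current segment and flushing it on a break) by a two-phase decomposition: first compute the list of segment-start indices from the purely local break test (non-unit step or direction change), then slice path_seq between consecutive start indices and read each segment's direction directly as dir_seq[start].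
import Mathlib
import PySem

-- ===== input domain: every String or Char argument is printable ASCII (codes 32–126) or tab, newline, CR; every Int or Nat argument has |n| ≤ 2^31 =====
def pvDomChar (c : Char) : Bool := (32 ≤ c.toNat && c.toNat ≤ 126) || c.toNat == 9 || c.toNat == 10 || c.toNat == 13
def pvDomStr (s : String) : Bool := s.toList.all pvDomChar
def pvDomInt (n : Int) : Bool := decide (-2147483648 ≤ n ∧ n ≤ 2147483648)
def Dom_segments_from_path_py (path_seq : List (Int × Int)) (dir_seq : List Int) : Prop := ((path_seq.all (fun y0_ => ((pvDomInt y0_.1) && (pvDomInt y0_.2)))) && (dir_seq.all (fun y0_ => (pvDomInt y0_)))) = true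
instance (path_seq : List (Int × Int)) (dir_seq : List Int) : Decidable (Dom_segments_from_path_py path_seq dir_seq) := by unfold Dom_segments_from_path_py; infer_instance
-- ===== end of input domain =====

-- B replaces A's single stateful fold by a two-phase decomposition (segment-start
-- indices from the local break test, then slicing); same asymptotic cost (alternative).

-- ===== PORT A =====
def segments_from_path_py (path_seq : List (Int × Int)) (dir_seq : List Int) : List ((List (Int × Int)) × Int) :=
  if path_seq = [] then []
  else
    let st :=
      (PySem.List.pyRange 1 path_seq.length 1).foldl
        (fun (st : List ((List (Int × Int)) × Int) × List (Int × Int) × Int) i =>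
          let p_prev := PySem.List.pyGetD path_seq (i - 1) (0, 0)
          let p := PySem.List.pyGetD path_seq i (0, 0)
          let _d_prev := PySem.List.pyGetD dir_seq (i - 1) 0
          let d := PySem.List.pyGetD dir_seq i 0
          let is_step := (p.1 - p_prev.1).natAbs + (p.2 - p_prev.2).natAbs == 1
          if is_step && d == st.2.2 then (st.1, st.2.1 ++ [p], st.2.2)
          else ((if st.2.1.length ≥ 1 then st.1 ++ [(st.2.1, st.2.2)] else st.1), [p], d))
        ([], [PySem.List.pyGetD path_seq 0 (0, 0)], PySem.List.pyGetD dir_seq 0 0)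
    if st.2.1.length ≥ 1 then st.1 ++ [(st.2.1, st.2.2)] else st.1

-- ===== PORT B =====
def segments_from_path_py_alt (path_seq : List (Int × Int)) (dir_seq : List Int) : List ((List (Int × Int)) × Int) :=
  if path_seq = [] then []
  else
    let n : Int := path_seq.length
    let starts : List Int := 0 ::
      (PySem.List.pyRange 1 n 1).filter (fun i =>
        !(((PySem.List.pyGetD path_seq i (0, 0)).1 - (PySem.List.pyGetD path_seq (i - 1) (0, 0)).1).natAbs
          + ((PySem.List.pyGetD path_seq i (0, 0)).2 - (PySem.List.pyGetD path_seq (i - 1) (0, 0)).2).natAbs == 1)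
        || !(PySem.List.pyGetD dir_seq i 0 == PySem.List.pyGetD dir_seq (i - 1) 0))
    let bounds := starts ++ [n]
    (bounds.zip (PySem.List.slice bounds (some 1) none)).map (fun se =>
      (PySem.List.slice path_seq (some se.1) (some se.2), PySem.List.pyGetD dir_seq se.1 0))

-- ===== PRECONDITION & SPEC =====
-- A (and likewise B) raises IndexError when path_seq is nonempty but dir_seq is
-- shorter than path_seq; Pre_ excludes exactly those inputs.
def Pre_segments_from_path_py (path_seq : List (Int × Int)) (dir_seq : List Int) : Prop :=
  path_seq ≠ [] → path_seq.length ≤ dir_seq.length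
instance (path_seq : List (Int × Int)) (dir_seq : List Int) : Decidable (Pre_segments_from_path_py path_seq dir_seq) := by unfold Pre_segments_from_path_py; infer_instance
def pvWitness_segments_from_path_py : (List (Int × Int)) × List Int := ([(0, 0), (0, 1)], [1, 1])

def Spec_segments_from_path_py (path_seq : List (Int × Int)) (dir_seq : List Int) (out : List ((List (Int × Int)) × Int)) : Prop := out = segments_from_path_py_alt path_seq dir_seq
instance (path_seq : List (Int × Int)) (dir_seq : List Int) (out : List ((List (Int × Int)) × Int)) : Decidable (Spec_segments_from_path_py path_seq dir_seq out) := by unfold Spec_segments_from_path_py; infer_instance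

-- ===== CLAIM (what is proved, stated in full; the proofs are below) =====
def Claim_equal_segments_from_path_py : Prop := ∀ (path_seq : List (Int × Int)) (dir_seq : List Int), Dom_segments_from_path_py path_seq dir_seq → Pre_segments_from_path_py path_seq dir_seq → Spec_segments_from_path_py path_seq dir_seq (segments_from_path_py path_seq dir_seq)

-- ===== LEMMAS AND PROOFS =====
def pvBrk (P : List (Int × Int)) (D : List Int) (i : Int) : Bool :=
  !(((PySem.List.pyGetD P i (0, 0)).1 - (PySem.List.pyGetD P (i - 1) (0, 0)).1).natAbs
    + ((PySem.List.pyGetD P i (0, 0)).2 - (PySem.List.pyGetD P (i - 1) (0, 0)).2).natAbs == 1)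
  || !(PySem.List.pyGetD D i 0 == PySem.List.pyGetD D (i - 1) 0)
def pvF (P : List (Int × Int)) (D : List Int) (k : Nat) : List Int :=
  (PySem.List.pyRange 1 (k : Int) 1).filter (pvBrk P D)
def pvLastN (P : List (Int × Int)) (D : List Int) : Nat → Nat
  | 0 => 0
  | 1 => 0
  | (k + 2) => if pvBrk P D ((k : Int) + 1) then k + 1 else pvLastN P D (k + 1)
def pvChop (P : List (Int × Int)) (D : List Int) : List Int → Int → List ((List (Int × Int)) × Int)
  | [], _ => []
  | s :: rest, e =>
      (PySem.List.slice P (some s) (some (rest.headD e)), PySem.List.pyGetD D s 0) :: pvChop P D rest e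
def pvBody (P : List (Int × Int)) (D : List Int)
    (st : List ((List (Int × Int)) × Int) × List (Int × Int) × Int) (i : Int) :
    List ((List (Int × Int)) × Int) × List (Int × Int) × Int :=
  let p_prev := PySem.List.pyGetD P (i - 1) (0, 0)
  let p := PySem.List.pyGetD P i (0, 0)
  let _d_prev := PySem.List.pyGetD D (i - 1) 0
  let d := PySem.List.pyGetD D i 0
  let is_step := (p.1 - p_prev.1).natAbs + (p.2 - p_prev.2).natAbs == 1
  if is_step && d == st.2.2 then (st.1, st.2.1 ++ [p], st.2.2)
  else ((if st.2.1.length ≥ 1 then st.1 ++ [(st.2.1, st.2.2)] else st.1), [p], d)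
def pvFoldA (P : List (Int × Int)) (D : List Int) (k : Nat) :
    List ((List (Int × Int)) × Int) × List (Int × Int) × Int :=
  (PySem.List.pyRange 1 (k : Int) 1).foldl (pvBody P D)
    ([], [PySem.List.pyGetD P 0 (0, 0)], PySem.List.pyGetD D 0 0)

theorem pvSlice_snoc (xs : List (Int × Int)) (a k : Nat) (ha : a ≤ k) (hk : k < xs.length) :
    PySem.List.slice xs (some (a : Int)) (some (k : Int)) ++ [xs[k]]
      = PySem.List.slice xs (some (a : Int)) (some ((k : Int) + 1)) := by
  have h1 : ((k : Int) + 1) = ((k + 1 : Nat) : Int) := by push_cast; ring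
  rw [h1, PySem.List.slice_natCast, PySem.List.slice_natCast]
  have h2 : k + 1 - a = (k - a) + 1 := by omega
  rw [h2, List.take_add_one]
  have h3 : (xs.drop a)[k - a]? = some xs[k] := by
    rw [List.getElem?_drop, List.getElem?_eq_getElem (by omega)]
    congr 1; congr 1; omega
  rw [h3]; rfl
theorem pvSlice_single (xs : List (Int × Int)) (k : Nat) (hk : k < xs.length) :
    PySem.List.slice xs (some (k : Int)) (some ((k : Int) + 1)) = [xs[k]] := by
  have h1 : ((k : Int) + 1) = ((k + 1 : Nat) : Int) := by push_cast; ring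
  rw [h1, PySem.List.slice_natCast]
  have h2 : k + 1 - k = 1 := by omega
  rw [h2, List.drop_eq_getElem_cons hk]; rfl
theorem pvSlice_len_pos (xs : List (Int × Int)) (a k : Nat) (h1 : a < k) (h2 : k ≤ xs.length) :
    1 ≤ (PySem.List.slice xs (some (a : Int)) (some (k : Int))).length := by
  rw [PySem.List.length_slice]; simp; omega
theorem pvFoldA_succ (P : List (Int × Int)) (D : List Int) (k : Nat) (hk : 1 ≤ k) :
    pvFoldA P D (k + 1) = pvBody P D (pvFoldA P D k) (k : Int) := by
  unfold pvFoldA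
  have h1 : ((k + 1 : Nat) : Int) = (k : Int) + 1 := by push_cast; ring
  rw [h1, PySem.List.pyRange_one_succ_right (by exact_mod_cast hk), List.foldl_append]
  rfl
theorem pvF_succ (P : List (Int × Int)) (D : List Int) (k : Nat) (hk : 1 ≤ k) :
    pvF P D (k + 1) = pvF P D k ++ if pvBrk P D (k : Int) then [(k : Int)] else [] := by
  unfold pvF
  have h1 : ((k + 1 : Nat) : Int) = (k : Int) + 1 := by push_cast; ring
  rw [h1, PySem.List.pyRange_one_succ_right (by exact_mod_cast hk), List.filter_append]
  congr 1
  by_cases h : pvBrk P D (k : Int) <;> simp [h]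
theorem pvLastN_succ (P : List (Int × Int)) (D : List Int) (k : Nat) (hk : 1 ≤ k) :
    pvLastN P D (k + 1) = if pvBrk P D (k : Int) then k else pvLastN P D k := by
  cases k with
  | zero => omega
  | succ m => show pvLastN P D (m + 2) = _; rw [pvLastN]; norm_cast
theorem pvChop_snoc (P : List (Int × Int)) (D : List Int) :
    ∀ (l : List Int) (s' e : Int),
      pvChop P D (l ++ [s']) e
        = pvChop P D l s' ++ [(PySem.List.slice P (some s') (some e), PySem.List.pyGetD D s' 0)] := by
  intro l
  induction l with
  | nil => intro s' e; simp [pvChop]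
  | cons s l' ih =>
      intro s' e
      simp only [List.cons_append, pvChop, ih, List.headD]
      cases l' <;> simp [pvChop]
theorem pvGetP (xs : List (Int × Int)) (k : Nat) (hk : k < xs.length) :
    PySem.List.pyGetD xs ((k : Nat) : Int) (0, 0) = xs[k] := by
  rw [PySem.List.pyGetD_eq_getElem xs (0, 0) (by positivity) (by exact_mod_cast hk)]
  simp

theorem pvInv (P : List (Int × Int)) (D : List Int) :
    ∀ (k : Nat), 1 ≤ k → k ≤ P.length →
      pvFoldA P D k = (pvChop P D (((0 : Int) :: pvF P D k).dropLast) ((pvLastN P D k : Nat) : Int),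
                       PySem.List.slice P (some ((pvLastN P D k : Nat) : Int)) (some (k : Int)),
                       PySem.List.pyGetD D ((pvLastN P D k : Nat) : Int) 0)
      ∧ (0 : Int) :: pvF P D k
          = ((0 : Int) :: pvF P D k).dropLast ++ [((pvLastN P D k : Nat) : Int)]
      ∧ PySem.List.pyGetD D ((pvLastN P D k : Nat) : Int) 0 = PySem.List.pyGetD D ((k : Int) - 1) 0
      ∧ pvLastN P D k < k := by
  intro k hk
  induction k, hk using Nat.le_induction with
  | base =>
      intro hP
      have hP0 : 0 < P.length := hP
      have hF1 : pvF P D 1 = [] := by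
        unfold pvF
        rw [PySem.List.pyRange_one_eq_nil (by norm_num)]
        rfl
      have hL1 : pvLastN P D 1 = 0 := rfl
      refine ⟨?_, by simp [hF1, hL1], by simp [hL1], by simp [hL1]⟩
      unfold pvFoldA
      rw [PySem.List.pyRange_one_eq_nil (by norm_num)]
      simp only [List.foldl_nil, hF1, hL1, Nat.cast_zero, Nat.cast_one]
      refine congrArg₂ Prod.mk rfl (congrArg₂ Prod.mk ?_ rfl)
      rw [show (PySem.List.pyGetD P 0 (0, 0)) = P[0] from pvGetP P 0 hP0]
      rw [show (1 : Int) = ((0 : Nat) : Int) + 1 from by norm_num]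
      exact (pvSlice_single P 0 hP0).symm
  | succ k hk ih =>
      intro hk1
      have hkle : k ≤ P.length := by omega
      have hkP : k < P.length := by omega
      obtain ⟨ha, hb, hc, hd⟩ := ih hkle
      rw [pvFoldA_succ P D k hk, pvF_succ P D k hk, pvLastN_succ P D k hk, ha]
      by_cases hbrk : pvBrk P D (k : Int) = true
      · -- break at k: flush the current segment and start a new one at k
        simp only [hbrk, reduceIte]
        have hcond : ((((PySem.List.pyGetD P (k : Int) (0, 0)).1 - (PySem.List.pyGetD P ((k : Int) - 1) (0, 0)).1).natAbs
            + ((PySem.List.pyGetD P (k : Int) (0, 0)).2 - (PySem.List.pyGetD P ((k : Int) - 1) (0, 0)).2).natAbs == 1)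
            && (PySem.List.pyGetD D (k : Int) 0 == PySem.List.pyGetD D ((pvLastN P D k : Nat) : Int) 0)) = false := by
          rw [hc]
          unfold pvBrk at hbrk
          rcases Bool.or_eq_true_iff.mp hbrk with h | h
          · rw [Bool.not_eq_true'] at h; rw [h, Bool.false_and]
          · rw [Bool.not_eq_true'] at h; rw [h, Bool.and_false]
        have hlen1 : (PySem.List.slice P (some ((pvLastN P D k : Nat) : Int)) (some (k : Int))).length ≥ 1 :=
          pvSlice_len_pos P (pvLastN P D k) k hd hkle
        unfold pvBody
        simp only [hcond, Bool.false_eq_true, if_false, ge_iff_le, if_pos hlen1]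
        refine ⟨?_, by rw [← List.cons_append, List.dropLast_concat], ?_, by omega⟩
        · have e1 : pvChop P D (((0 : Int) :: (pvF P D k ++ [(k : Int)])).dropLast) ((k : Nat) : Int)
              = pvChop P D (((0 : Int) :: pvF P D k).dropLast) ((pvLastN P D k : Nat) : Int)
                ++ [(PySem.List.slice P (some ((pvLastN P D k : Nat) : Int)) (some (k : Int)),
                     PySem.List.pyGetD D ((pvLastN P D k : Nat) : Int) 0)] := by
            rw [show ((0 : Int) :: (pvF P D k ++ [(k : Int)])).dropLast = (0 : Int) :: pvF P D k from by rw [← List.cons_append, List.dropLast_concat]]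
            conv_lhs => rw [hb]
            rw [pvChop_snoc]
          have e2 : PySem.List.slice P (some ((k : Nat) : Int)) (some ((k + 1 : Nat) : Int))
              = [PySem.List.pyGetD P ((k : Nat) : Int) (0, 0)] := by
            rw [pvGetP P k hkP,
                show ((k + 1 : Nat) : Int) = ((k : Nat) : Int) + 1 from by push_cast; ring]
            exact pvSlice_single P k hkP
          rw [e1, e2]
        · rw [show ((k + 1 : Nat) : Int) - 1 = ((k : Nat) : Int) from by push_cast; ring]
      · -- no break at k: extend the current segment
        rw [Bool.not_eq_true] at hbrk
        simp only [hbrk, Bool.false_eq_true, reduceIte, List.append_nil]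
        unfold pvBrk at hbrk
        rw [Bool.or_eq_false_iff] at hbrk
        obtain ⟨hA, hB⟩ := hbrk
        rw [Bool.not_eq_false'] at hA hB
        have hcond : ((((PySem.List.pyGetD P (k : Int) (0, 0)).1 - (PySem.List.pyGetD P ((k : Int) - 1) (0, 0)).1).natAbs
            + ((PySem.List.pyGetD P (k : Int) (0, 0)).2 - (PySem.List.pyGetD P ((k : Int) - 1) (0, 0)).2).natAbs == 1)
            && (PySem.List.pyGetD D (k : Int) 0 == PySem.List.pyGetD D ((pvLastN P D k : Nat) : Int) 0)) = true := by
          rw [hc, hA, hB]; rfl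
        unfold pvBody
        simp only [hcond, if_true]
        refine ⟨?_, hb, ?_, by omega⟩
        · have e2 : PySem.List.slice P (some ((pvLastN P D k : Nat) : Int)) (some ((k + 1 : Nat) : Int))
              = PySem.List.slice P (some ((pvLastN P D k : Nat) : Int)) (some ((k : Nat) : Int))
                ++ [PySem.List.pyGetD P ((k : Nat) : Int) (0, 0)] := by
            rw [pvGetP P k hkP,
                show ((k + 1 : Nat) : Int) = ((k : Nat) : Int) + 1 from by push_cast; ring]
            exact (pvSlice_snoc P (pvLastN P D k) k (by omega) hkP).symm
          rw [e2]
        · rw [show ((k + 1 : Nat) : Int) - 1 = ((k : Nat) : Int) from by push_cast; ring,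
              hc, (beq_iff_eq.mp hB)]

theorem pvChop_zip (P : List (Int × Int)) (D : List Int) :
    ∀ (l : List Int) (s e : Int),
      (((s :: l) ++ [e]).zip (l ++ [e])).map
        (fun se => (PySem.List.slice P (some se.1) (some se.2), PySem.List.pyGetD D se.1 0))
      = pvChop P D (s :: l) e := by
  intro l
  induction l with
  | nil => intro s e; simp [pvChop]
  | cons s' l' ih =>
      intro s e
      simp only [List.cons_append, List.zip_cons_cons, List.map_cons]
      have h := ih s' e
      simp only [List.cons_append] at h
      rw [h]
      simp [pvChop]

theorem pvPortA_render (P : List (Int × Int)) (D : List Int) (hP : P ≠ []) :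
    segments_from_path_py P D
      = (if (pvFoldA P D P.length).2.1.length ≥ 1
         then (pvFoldA P D P.length).1 ++ [((pvFoldA P D P.length).2.1, (pvFoldA P D P.length).2.2)]
         else (pvFoldA P D P.length).1) := by
  unfold segments_from_path_py pvFoldA pvBody
  rw [if_neg hP]

theorem pvMain (P : List (Int × Int)) (D : List Int) (hP : P ≠ []) :
    segments_from_path_py P D = segments_from_path_py_alt P D := by
  have hn : 1 ≤ P.length := List.length_pos_of_ne_nil hP
  obtain ⟨ha, hb, hc, hd⟩ := pvInv P D P.length hn (le_refl _)
  have hlen1 : (pvFoldA P D P.length).2.1.length ≥ 1 := by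
    rw [ha]
    exact pvSlice_len_pos P (pvLastN P D P.length) P.length hd (le_refl _)
  have hA : segments_from_path_py P D
      = pvChop P D ((0 : Int) :: pvF P D P.length) ((P.length : Nat) : Int) := by
    rw [pvPortA_render P D hP, if_pos hlen1, ha]
    conv_rhs => rw [hb]
    rw [pvChop_snoc]
  have hB : segments_from_path_py_alt P D
      = pvChop P D ((0 : Int) :: pvF P D P.length) ((P.length : Nat) : Int) := by
    unfold segments_from_path_py_alt
    rw [if_neg hP]
    show ((((0 : Int) :: pvF P D P.length) ++ [(P.length : Int)]).zip
        (PySem.List.slice (((0 : Int) :: pvF P D P.length) ++ [(P.length : Int)]) (some 1) none)).map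
        (fun se => (PySem.List.slice P (some se.1) (some se.2), PySem.List.pyGetD D se.1 0))
      = _
    rw [PySem.List.slice_from_one]
    rw [show (((0 : Int) :: pvF P D P.length) ++ [(P.length : Int)]).tail
          = pvF P D P.length ++ [(P.length : Int)] from rfl]
    exact pvChop_zip P D (pvF P D P.length) 0 (P.length : Int)
  rw [hA, hB]

-- ===== VERDICT (by name: the statement is the Claim_ definition above) =====
theorem segments_from_path_py_spec : Claim_equal_segments_from_path_py := by
  intro P D _hdom _hpre
  unfold Spec_segments_from_path_py
  by_cases hP : P = []
  · subst hP
    rfl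
  · exact pvMain P D hP
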